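-- pv_equiv track=rewrite | github.com/YuliannaKololmoiets/laba6 | ex6/ex6.py | max_block_length
-- ===== SOURCE A (Python) =====
-- def max_block_length(s):
--     n = len(s)
--     max_len = 0
--
--     for k in range(1, n):
--         length = 0
--         for i in range(n - k):
--             if s[i] == s[k + i]:
--                 length += 1
--             else:
--                 break
--         max_len = max(max_len, length)
--
--     return max_len
-- ===== SOURCE B (Python) =====
-- def max_block_length(s):
--     # Z-algorithm: z[k] = longest common prefix of s and s[k:]; answer = max z[1..n-1].
--     n = len(s)
--     z = [0]
--     l = r = 0
--     best = 0
--     for k in range(1, n):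
--         zk = min(r - k, z[k - l]) if k < r else 0
--         while k + zk < n and s[zk] == s[k + zk]:
--             zk += 1
--         if k + zk > r:
--             l, r = k, k + zk
--         z.append(zk)
--         best = max(best, zk)
--     return best
-- ===== Notes on version B (the rewrite author's own statement) =====
-- stated objective: faster
-- what changed: Replaces the quadratic rescan-from-zero loop over every shift with the Z-algorithm (maintains the rightmost match window [l,r) to start each extension from a precomputed value), taking the max of Z[1..n-1].
import Mathlib
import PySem

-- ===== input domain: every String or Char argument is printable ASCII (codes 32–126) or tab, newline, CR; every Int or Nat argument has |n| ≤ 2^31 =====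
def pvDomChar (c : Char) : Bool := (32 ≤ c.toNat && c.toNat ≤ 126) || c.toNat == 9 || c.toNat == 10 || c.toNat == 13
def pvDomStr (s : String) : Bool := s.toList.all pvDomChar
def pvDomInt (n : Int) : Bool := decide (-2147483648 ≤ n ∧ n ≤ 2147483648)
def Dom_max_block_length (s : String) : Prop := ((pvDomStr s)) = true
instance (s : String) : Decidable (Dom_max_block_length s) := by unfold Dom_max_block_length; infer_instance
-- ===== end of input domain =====

-- B replaces A's O(n^2) rescan over every shift by the linear-time Z-algorithm; same return value.

-- ===== PORT A =====
-- Inner `for i in range(n - k): if s[i] == s[k + i]: length += 1 else: break`.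
-- All Python indexes here are nonnegative and < len(s), so `getD` equals Python's s[i] exactly.
def aInner (cs : List Char) (k i : Nat) : Nat :=
  if i < cs.length - k then
    if cs.getD i ' ' = cs.getD (k + i) ' ' then aInner cs k (i + 1) else i
  else i
termination_by cs.length - k - i

def max_block_length (s : String) : Int :=
  let cs := s.toList
  let n := cs.length
  -- for k in range(1, n): max_len = max(max_len, length)
  (((List.range' 1 (n - 1)).foldl (fun maxLen k => max maxLen (aInner cs k 0)) 0 : Nat) : Int)

-- ===== PORT B =====
-- `while k + zk < n and s[zk] == s[k + zk]: zk += 1` (indexes in range, so getD is exact).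
def bExtend (cs : List Char) (k zk : Nat) : Nat :=
  if k + zk < cs.length then
    if cs.getD zk ' ' = cs.getD (k + zk) ' ' then bExtend cs k (zk + 1) else zk
  else zk
termination_by cs.length - (k + zk)

-- One iteration of B's `for k in range(1, n)` over the state (z, l, r, best).
def bStep (cs : List Char) (st : List Nat × Nat × Nat × Nat) (k : Nat) :
    List Nat × Nat × Nat × Nat :=
  let (z, l, r, best) := st
  let zk0 := if k < r then min (r - k) (z.getD (k - l) 0) else 0
  let zk := bExtend cs k zk0
  let lr := if r < k + zk then (k, k + zk) else (l, r)
  (z ++ [zk], lr.1, lr.2, max best zk)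

def max_block_length_alt (s : String) : Int :=
  let cs := s.toList
  let n := cs.length
  ((((List.range' 1 (n - 1)).foldl (bStep cs) ([0], 0, 0, 0)).2.2.2 : Nat) : Int)

-- ===== PRECONDITION & SPEC =====
def Spec_max_block_length (s : String) (out : Int) : Prop := out = max_block_length_alt s
instance (s : String) (out : Int) : Decidable (Spec_max_block_length s out) := by unfold Spec_max_block_length; infer_instance

-- ===== CLAIM (what is proved, stated in full; the proofs are below) =====
def Claim_equal_max_block_length : Prop := ∀ (s : String), Dom_max_block_length s → Spec_max_block_length s (max_block_length s)

-- ===== LEMMAS AND PROOFS =====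

-- A's inner loop and B's extension while-loop are the same scan.
theorem aInner_eq_bExtend (cs : List Char) (k i : Nat) : aInner cs k i = bExtend cs k i := by
  fun_induction aInner cs k i with
  | case1 i h1 h2 ih => rw [bExtend, if_pos (by omega), if_pos h2]; exact ih
  | case2 i h1 h2 => rw [bExtend, if_pos (by omega), if_neg h2]
  | case3 i h1 => rw [bExtend, if_neg (by omega)]

-- bExtend never runs past the end of the string.
theorem bExtend_le (cs : List Char) (k i : Nat) (h : k + i ≤ cs.length) :
    k + bExtend cs k i ≤ cs.length := by
  fun_induction bExtend cs k i with
  | case1 i h1 h2 ih => exact ih (by omega)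
  | case2 i h1 h2 => omega
  | case3 i h1 => omega

-- every position scanned by bExtend (from i up to the result) matched.
theorem bExtend_matches (cs : List Char) (k i j : Nat) (hij : i ≤ j)
    (hj : j < bExtend cs k i) : cs.getD j ' ' = cs.getD (k + j) ' ' := by
  fun_induction bExtend cs k i with
  | case1 i h1 h2 ih =>
    rcases Nat.eq_or_lt_of_le hij with h | h
    · exact h ▸ h2
    · exact ih h hj
  | case2 i h1 h2 => omega
  | case3 i h1 => omega

-- starting the scan at i is the same as starting at 0, if positions below i match.
theorem bExtend_start (cs : List Char) (k i : Nat) (hle : k + i ≤ cs.length)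
    (hm : ∀ j, j < i → cs.getD j ' ' = cs.getD (k + j) ' ') :
    bExtend cs k i = bExtend cs k 0 := by
  induction i with
  | zero => rfl
  | succ i ih =>
    have step : bExtend cs k i = bExtend cs k (i + 1) := by
      rw [bExtend, if_pos (by omega), if_pos (hm i (by omega))]
    rw [← step, ih (by omega) (fun j hj => hm j (by omega))]

-- invariant of B's fold state before processing index k
def ZInv (cs : List Char) (k : Nat) (st : List Nat × Nat × Nat × Nat) : Prop :=
  st.1.length = k ∧ st.2.1 < k ∧ st.2.2.1 ≤ cs.length ∧
  (∀ j, st.2.1 + j < st.2.2.1 → cs.getD j ' ' = cs.getD (st.2.1 + j) ' ') ∧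
  (∀ j, 1 ≤ j → j < k → st.1.getD j 0 = bExtend cs j 0)

theorem bStep_inv (cs : List Char) (k : Nat) (st : List Nat × Nat × Nat × Nat)
    (hinv : ZInv cs k st) (hk1 : 1 ≤ k) (hkn : k < cs.length) :
    ZInv cs (k + 1) (bStep cs st k) ∧
      (bStep cs st k).2.2.2 = max st.2.2.2 (bExtend cs k 0) := by
  obtain ⟨z, l, r, best⟩ := st
  obtain ⟨hz, hl, hr, hw, hzc⟩ := hinv
  simp only at hz hl hr hw hzc
  set zk0 : Nat := if k < r then min (r - k) (z.getD (k - l) 0) else 0 with hzk0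
  have hm : ∀ j, j < zk0 → cs.getD j ' ' = cs.getD (k + j) ' ' := by
    intro j hj
    by_cases hkr : k < r
    · rw [hzk0, if_pos hkr] at hj
      by_cases ht : k - l < k
      · have hzt : z.getD (k - l) 0 = bExtend cs (k - l) 0 := hzc (k - l) (by omega) ht
        have hm1 : cs.getD j ' ' = cs.getD ((k - l) + j) ' ' :=
          bExtend_matches cs (k - l) 0 j (Nat.zero_le j) (by omega)
        have hm2 : cs.getD ((k - l) + j) ' ' = cs.getD (l + ((k - l) + j)) ' ' :=
          hw ((k - l) + j) (by omega)
        have heq : l + ((k - l) + j) = k + j := by omega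
        rw [hm1, hm2, heq]
      · have : z.getD (k - l) 0 = 0 := List.getD_eq_default _ _ (by omega)
        omega
    · rw [hzk0, if_neg hkr] at hj; omega
  have hle : k + zk0 ≤ cs.length := by
    by_cases hkr : k < r
    · rw [hzk0, if_pos hkr]; omega
    · rw [hzk0, if_neg hkr]; omega
  have hzkeq : bExtend cs k zk0 = bExtend cs k 0 := bExtend_start cs k zk0 hle hm
  have hblen : k + bExtend cs k 0 ≤ cs.length := bExtend_le cs k 0 (by omega)
  have hbm : ∀ j, j < bExtend cs k 0 → cs.getD j ' ' = cs.getD (k + j) ' ' :=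
    fun j hj => bExtend_matches cs k 0 j (Nat.zero_le j) hj
  unfold bStep
  simp only [← hzk0, hzkeq]
  constructor
  · refine ⟨by simp [hz], ?_, ?_, ?_, ?_⟩
    · split <;> simp
      omega
    · split
      · simpa using hblen
      · simpa using hr
    · split
      · rename_i hwin
        intro j hj
        simp only at hj ⊢
        exact hbm j (by omega)
      · intro j hj
        simp only at hj ⊢
        exact hw j hj
    · intro j hj1 hj2
      simp only
      rcases Nat.lt_or_ge j k with hjk | hjk
      · rw [List.getD_append _ _ _ _ (by omega)]
        exact hzc j hj1 hjk
      · have hjk' : j = k := by omega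
        subst hjk'
        rw [List.getD_append_right _ _ _ _ (by omega), hz]
        simp
  · simp

theorem fold_eq (cs : List Char) (m : Nat) (hm : m < cs.length) :
    ZInv cs (m + 1) ((List.range' 1 m).foldl (bStep cs) ([0], 0, 0, 0)) ∧
      ((List.range' 1 m).foldl (bStep cs) ([0], 0, 0, 0)).2.2.2 =
        (List.range' 1 m).foldl (fun maxLen k => max maxLen (aInner cs k 0)) 0 := by
  revert hm
  induction m with
  | zero =>
    intro _
    simp only [List.range'_zero, List.foldl_nil]
    refine ⟨?_, by trivial⟩
    unfold ZInv
    refine ⟨rfl, Nat.zero_lt_one, Nat.zero_le _, ?_, ?_⟩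
    · intro j hj; simp at hj
    · intro j hj1 hj2; omega
  | succ m ih =>
    intro hm
    obtain ⟨hinv, hbest⟩ := ih (by omega)
    rw [List.range'_1_concat, Nat.add_comm 1 m, List.foldl_append, List.foldl_append]
    obtain ⟨hinv', hbest'⟩ := bStep_inv cs (m + 1) _ hinv (by omega) (by omega)
    constructor
    · exact hinv'
    · simp only [List.foldl_cons, List.foldl_nil]
      rw [hbest', hbest, aInner_eq_bExtend]

-- ===== VERDICT (by name: the statement is the Claim_ definition above) =====
theorem max_block_length_spec : Claim_equal_max_block_length := by
  intro s _
  unfold Spec_max_block_length max_block_length max_block_length_alt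
  rcases Nat.eq_zero_or_pos s.toList.length with h | h
  · simp [h]
  · have := (fold_eq s.toList (s.toList.length - 1) (by omega)).2
    simp only [this]
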